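-- pv_equiv track=rewrite | github.com/BasedJellyfish11/Advent-of-Code-2021 | paum/18/18.py | find_comma
-- ===== SOURCE A (Python) =====
-- def find_comma(snail_string):
--
--     nested = 0
--
--     for i, char in enumerate(snail_string):
--         if char == "," and nested == 1:
--             return i
--         elif char == "[":
--             nested += 1
--         elif char == "]":
--             nested -= 1
-- ===== SOURCE B (Python) =====
-- def find_comma(snail_string):
--     # Pass 1: tabulate nesting depth BEFORE each character.
--     depths = []
--     d = 0
--     for ch in snail_string:
--         depths.append(d)
--         if ch == "[":
--             d += 1
--         elif ch == "]":
--             d -= 1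
--     # Pass 2: first index whose char is ',' at depth 1; None if absent.
--     return next((i for i, (ch, dep) in enumerate(zip(snail_string, depths))
--                  if ch == "," and dep == 1), None)
-- ===== Notes on version B (the rewrite author's own statement) =====
-- stated objective: alternative
-- what changed: Replaces the single interleaved scan-with-counter-and-early-return by two passes: first a prefix depth table is built, then a separate search selects the first comma whose tabulated depth is 1.
import Mathlib
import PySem

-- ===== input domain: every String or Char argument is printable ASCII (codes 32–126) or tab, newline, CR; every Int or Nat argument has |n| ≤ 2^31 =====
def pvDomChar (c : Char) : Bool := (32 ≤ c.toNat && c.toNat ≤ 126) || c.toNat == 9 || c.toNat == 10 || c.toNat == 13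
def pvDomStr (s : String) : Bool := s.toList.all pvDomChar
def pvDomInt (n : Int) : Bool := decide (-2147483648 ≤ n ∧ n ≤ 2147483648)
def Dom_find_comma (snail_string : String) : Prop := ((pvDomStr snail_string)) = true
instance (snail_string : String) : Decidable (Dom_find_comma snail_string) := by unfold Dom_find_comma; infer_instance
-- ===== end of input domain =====

-- B replaces A's interleaved scan-with-counter by a prefix-depth table plus a separate first-match search (alternative decomposition, same cost).


-- ===== PORT A =====
-- A's single loop: enumerate with an index and a running `nested` counter, early return at a depth-1 comma.
def findAGo : List Char → Int → Int → Option Int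
  | [], _, _ => none
  | c :: rest, i, nested =>
    if c = ',' ∧ nested = 1 then some i
    else if c = '[' then findAGo rest (i + 1) (nested + 1)
    else if c = ']' then findAGo rest (i + 1) (nested - 1)
    else findAGo rest (i + 1) nested

def find_comma (snail_string : String) : Option Int :=
  findAGo snail_string.toList 0 0

-- ===== PORT B =====
-- B pass 1: the depth-before-each-character table.
def altDepths : List Char → Int → List Int
  | [], _ => []
  | c :: rest, d =>
      d :: altDepths rest (if c = '[' then d + 1 else if c = ']' then d - 1 else d)

-- B pass 2: first index of (char, depth) = (',', 1) over the zipped table; none if absent.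
def find_comma_alt (snail_string : String) : Option Int :=
  (((snail_string.toList.zip (altDepths snail_string.toList 0)).findIdx?
      (fun p => p.1 == ',' && p.2 == 1)).map (fun n => (n : Int)))

-- ===== PRECONDITION & SPEC =====
def Spec_find_comma (snail_string : String) (out : Option Int) : Prop := out = find_comma_alt snail_string
instance (snail_string : String) (out : Option Int) : Decidable (Spec_find_comma snail_string out) := by unfold Spec_find_comma; infer_instance

-- ===== CLAIM (what is proved, stated in full; the proofs are below) =====
def Claim_equal_find_comma : Prop := ∀ (snail_string : String), Dom_find_comma snail_string → Spec_find_comma snail_string (find_comma snail_string)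

-- ===== LEMMAS AND PROOFS =====
theorem mapShift (F : Option Nat) (i : Int) :
    Option.map (fun n : Nat => ((n + 1 : Nat) : Int) + i) F =
      Option.map (fun n : Int => n + i)
        ((Option.map (fun k : Nat => k + 1) F).bind (fun a => some ((a : Nat) : Int))) := by
  cases F <;> simp

theorem findAGo_eq_table (cs : List Char) :
    ∀ (d i : Int),
      findAGo cs i d =
        ((cs.zip (altDepths cs d)).findIdx? (fun p => p.1 == ',' && p.2 == 1)).map
          (fun n => (n : Int) + i) := by
  induction cs with
  | nil => intro d i; simp [findAGo, altDepths]
  | cons c rest ih =>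
    intro d i
    simp only [findAGo, altDepths, List.zip_cons_cons, List.findIdx?_cons]
    by_cases h1 : c = ',' ∧ d = 1
    · simp [h1.1, h1.2]
    · have hp : (c == ',' && d == 1) = false := by
        by_cases hc : c = ',' <;> simp_all
      rw [if_neg h1]
      simp only [hp, Bool.false_eq_true, if_false]
      have step : ∀ d' : Int,
          findAGo rest (i + 1) d' =
            (((rest.zip (altDepths rest d')).findIdx? (fun p => p.1 == ',' && p.2 == 1)).map
              (fun n : Nat => (↑(n + 1) : Int) + i)) := by
        intro d'
        rw [ih d' (i + 1)]
        cases (rest.zip (altDepths rest d')).findIdx? (fun p => p.1 == ',' && p.2 == 1) with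
        | none => simp
        | some n => simp; push_cast; ring
      split_ifs <;> (rw [step]; exact mapShift _ i)
-- ===== VERDICT (by name: the statement is the Claim_ definition above) =====
theorem find_comma_spec : Claim_equal_find_comma := by
  intro s _
  unfold Spec_find_comma find_comma find_comma_alt
  rw [findAGo_eq_table]
  cases (s.toList.zip (altDepths s.toList 0)).findIdx? (fun p => p.1 == ',' && p.2 == 1) with
  | none => rfl
  | some n => simp
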